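-- pv_equiv track=rewrite | github.com/panos-magn/Take-the-key-words | keywords.py | fisp
-- ===== SOURCE A (Python) =====
-- def fisp(lis):
--     pointlist=[]
--     point=0
--     chanpoint = 0
--     for i in lis :
--         if i==" " :
--                 i.replace(" ","")
--                 if chanpoint==0 :
--                     pointlist.append(point)
--                     chanpoint=chanpoint+1
--         else :
--             chanpoint=0
--         point=point+1
--     return pointlist
-- ===== SOURCE B (Python) =====
-- def fisp(lis):
--     xs = list(lis)
--     n = len(xs)
--     runs = []  # (value, start index) of each maximal run of equal elements
--     i = 0
--     while i < n:
--         j = i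
--         while j < n and xs[j] == xs[i]:
--             j += 1
--         runs.append((xs[i], i))
--         i = j
--     return [start for value, start in runs if value == " "]
-- ===== Notes on version B (the rewrite author's own statement) =====
-- stated objective: alternative
-- what changed: B first decomposes the input into maximal runs of equal elements (value, start) by jumping indices run to run, then filters the starts of space runs, instead of A's per-element loop with a run-start flag.
import Mathlib
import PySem

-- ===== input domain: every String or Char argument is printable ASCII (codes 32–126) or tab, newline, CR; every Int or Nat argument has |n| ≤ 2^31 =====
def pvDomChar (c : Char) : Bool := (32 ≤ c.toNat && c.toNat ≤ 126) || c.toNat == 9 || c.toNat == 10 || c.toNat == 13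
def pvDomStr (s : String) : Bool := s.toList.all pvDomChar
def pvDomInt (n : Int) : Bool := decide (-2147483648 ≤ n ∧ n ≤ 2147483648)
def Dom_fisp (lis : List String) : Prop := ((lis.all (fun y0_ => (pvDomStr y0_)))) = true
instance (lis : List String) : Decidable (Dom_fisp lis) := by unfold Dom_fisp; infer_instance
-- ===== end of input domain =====

-- B decomposes the input into maximal runs (value, start) and filters space runs' starts, instead of A's per-element flag loop (alternative, same cost).

-- ===== PORT A =====
-- state = (pointlist, point, chanpoint); the Python's `i.replace(" ","")` discards its result and is a no-op, omitted.
def fispStep (s : List Int × Int × Int) (i : String) : List Int × Int × Int :=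
  match s with
  | (pointlist, point, chanpoint) =>
    if i == " " then
      if chanpoint == 0 then (pointlist ++ [point], point + 1, chanpoint + 1)
      else (pointlist, point + 1, chanpoint)
    else (pointlist, point + 1, 0)

def fisp (lis : List String) : List Int :=
  (lis.foldl fispStep ([], 0, 0)).1

-- ===== PORT B =====
-- inner `while j < n and xs[j] == xs[i]` loop: advances j to the end of the run of x starting at j
-- (fuel is only a structural-termination guard; calls pass fuel ≥ xs.length - j, so it never runs out)
def runEnd (xs : List String) (x : String) (j : Nat) (fuel : Nat) : Nat :=
  match fuel with
  | 0 => j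
  | fuel + 1 =>
    if h : j < xs.length then
      if xs[j] == x then runEnd xs x (j + 1) fuel else j
    else j

-- outer `while i < n` loop, collecting (value, start) of each maximal run (fuel ≥ xs.length - i, same guard)
def buildRuns (xs : List String) (i : Nat) (runs : List (String × Int)) (fuel : Nat) : List (String × Int) :=
  match fuel with
  | 0 => runs
  | fuel + 1 =>
    if h : i < xs.length then
      buildRuns xs (runEnd xs xs[i] i (xs.length - i)) (runs ++ [(xs[i], (i : Int))]) fuel
    else runs

def fisp_alt (lis : List String) : List Int :=
  (buildRuns lis 0 [] lis.length).filterMap (fun p => if p.1 == " " then some p.2 else none)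

-- ===== PRECONDITION & SPEC =====
def Spec_fisp (lis : List String) (out : List Int) : Prop := out = fisp_alt lis
instance (lis : List String) (out : List Int) : Decidable (Spec_fisp lis out) := by unfold Spec_fisp; infer_instance

-- ===== CLAIM (what is proved, stated in full; the proofs are below) =====
def Claim_equal_fisp : Prop := ∀ (lis : List String), Dom_fisp lis → Spec_fisp lis (fisp lis)

-- ===== LEMMAS AND PROOFS =====

-- Common reference: first-space-of-each-run, with the index counter p and a flag b = "previous element was a space".
def fispAux : List String → Int → Bool → List Int
  | [], _, _ => []
  | x :: xs, p, b =>
    if x == " " then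
      if b then fispAux xs (p + 1) true else p :: fispAux xs (p + 1) true
    else fispAux xs (p + 1) false

theorem fispA_aux (xs : List String) : ∀ (acc : List Int) (p : Int) (b : Bool),
    (xs.foldl fispStep (acc, p, if b then 1 else 0)).1 = acc ++ fispAux xs p b := by
  induction xs with
  | nil => intro acc p b; simp [fispAux]
  | cons x t ih =>
    intro acc p b
    by_cases hx : x = " "
    · cases b with
      | false =>
        simpa [fispStep, fispAux, hx] using ih (acc ++ [p]) (p + 1) true
      | true =>
        simpa [fispStep, fispAux, hx] using ih acc (p + 1) true
    · simpa [fispStep, fispAux, hx] using ih acc (p + 1) false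

theorem runEnd_ge (xs : List String) (x : String) :
    ∀ (fuel j : Nat), j ≤ runEnd xs x j fuel := by
  intro fuel
  induction fuel with
  | zero => intro j; simp [runEnd]
  | succ n ih =>
    intro j
    rw [runEnd]
    split_ifs with h1 h2
    · exact le_trans (by omega) (ih (j + 1))
    · exact le_refl j
    · exact le_refl j

theorem runEnd_le (xs : List String) (x : String) :
    ∀ (fuel j : Nat), j ≤ xs.length → runEnd xs x j fuel ≤ xs.length := by
  intro fuel
  induction fuel with
  | zero => intro j h; simpa [runEnd] using h
  | succ n ih =>
    intro j h
    rw [runEnd]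
    split_ifs with h1 h2
    · exact ih (j + 1) (by omega)
    · exact h
    · exact h

theorem runEnd_mem (xs : List String) (x : String) :
    ∀ (fuel j t : Nat), j ≤ t → t < runEnd xs x j fuel → xs[t]? = some x := by
  intro fuel
  induction fuel with
  | zero => intro j t h1 h2; rw [runEnd] at h2; omega
  | succ n ih =>
    intro j t h1 h2
    rw [runEnd] at h2
    split_ifs at h2 with hk hx
    · by_cases ht : t = j
      · subst ht
        rw [List.getElem?_eq_getElem hk]
        exact congrArg some (eq_of_beq hx)
      · exact ih (j + 1) t (by omega) h2
    · omega
    · omega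

theorem runEnd_stop (xs : List String) (x : String) :
    ∀ (fuel j : Nat), xs.length - j ≤ fuel → xs[runEnd xs x j fuel]? ≠ some x := by
  intro fuel
  induction fuel with
  | zero =>
    intro j h
    rw [runEnd, List.getElem?_eq_none_iff.mpr (by omega)]
    simp
  | succ n ih =>
    intro j h
    rw [runEnd]
    split_ifs with hk hx
    · exact ih (j + 1) (by omega)
    · rw [List.getElem?_eq_getElem hk]
      intro hc
      have : (xs[j] == x) = true := beq_iff_eq.mpr (Option.some.inj hc)
      simp [this] at hx
    · rw [List.getElem?_eq_none_iff.mpr (by omega)]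
      simp

theorem lt_runEnd (xs : List String) (x : String) (fuel j : Nat)
    (h : j < xs.length) (hf : 1 ≤ fuel) (hx : (xs[j] == x) = true) :
    j < runEnd xs x j fuel := by
  obtain ⟨n, rfl⟩ : ∃ n, fuel = n + 1 := ⟨fuel - 1, by omega⟩
  rw [runEnd]
  simp only [h, hx, dif_pos, if_pos]
  have := runEnd_ge xs x n (j + 1)
  omega

-- stepping through the tail of a run does not change fispAux when the flag already records the run's value
theorem fispAux_run (xs : List String) (x : String) (j : Nat) (hj : j ≤ xs.length) :
    ∀ k, k ≤ j → (∀ t, k ≤ t → t < j → xs[t]? = some x) →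
    fispAux (xs.drop k) (k : Int) (x == " ") = fispAux (xs.drop j) (j : Int) (x == " ") := by
  intro k hk
  induction hn : j - k generalizing k with
  | zero =>
    intro _
    have : k = j := by omega
    subst this; rfl
  | succ n ih =>
    intro hmem
    have hklt : k < j := by omega
    have hkx : xs[k]? = some x := hmem k (le_refl k) hklt
    have hklen : k < xs.length := by
      by_contra hc
      rw [List.getElem?_eq_none_iff.mpr (by omega)] at hkx
      simp at hkx
    have hxk : xs[k] = x := by
      rw [List.getElem?_eq_getElem hklen] at hkx
      exact Option.some.inj hkx
    have hdrop : xs.drop k = x :: xs.drop (k + 1) := by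
      rw [List.drop_eq_getElem_cons hklen, hxk]
    have hrec := ih (k + 1) (by omega) (by omega)
      (fun t h1 h2 => hmem t (by omega) h2)
    rw [hdrop]
    by_cases hx : x = " "
    · simp only [fispAux, hx, beq_self_eq_true, if_pos]
      rw [show ((k : Int) + 1) = ((k + 1 : Nat) : Int) by push_cast; ring]
      simpa [hx] using hrec
    · have hxb : (x == " ") = false := beq_eq_false_iff_ne.mpr hx
      simp only [fispAux, hxb, Bool.false_eq_true, if_false]
      rw [show ((k : Int) + 1) = ((k + 1 : Nat) : Int) by push_cast; ring]
      simpa [hxb] using hrec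

theorem buildRuns_spec (xs : List String) : ∀ (fuel i : Nat) (runs : List (String × Int)) (b : Bool),
    xs.length - i ≤ fuel →
    (b = true → xs[i]? ≠ some " ") →
    (buildRuns xs i runs fuel).filterMap (fun p => if p.1 == " " then some p.2 else none)
      = runs.filterMap (fun p => if p.1 == " " then some p.2 else none)
        ++ fispAux (xs.drop i) (i : Int) b := by
  intro fuel
  induction fuel with
  | zero =>
    intro i runs b hle _
    have hge : xs.length ≤ i := by omega
    rw [buildRuns]
    simp [List.drop_eq_nil_of_le hge, fispAux]
  | succ n ih =>
    intro i runs b hle hb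
    by_cases h : i < xs.length
    · set x := xs[i] with hx
      set j := runEnd xs x i (xs.length - i) with hjdef
      have hij : i < j := lt_runEnd xs x (xs.length - i) i h (by omega) (by simp [hx])
      have hjle : j ≤ xs.length := runEnd_le xs x (xs.length - i) i (by omega)
      rw [buildRuns]
      simp only [h, dif_pos, ← hx, ← hjdef]
      rw [ih j (runs ++ [(x, (i : Int))]) (x == " ") (by omega)
        (fun hxs => by
          rw [beq_iff_eq] at hxs; rw [← hxs]
          exact runEnd_stop xs x (xs.length - i) i (by omega))]
      rw [List.filterMap_append]
      have hdrop : xs.drop i = x :: xs.drop (i + 1) := List.drop_eq_getElem_cons h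
      have hrun := fispAux_run xs x j hjle (i + 1) (by omega)
        (fun t h1 h2 => runEnd_mem xs x (xs.length - i) i t (by omega) h2)
      rw [hdrop]
      by_cases hsp : x = " "
      · have hbf : b = false := by
          cases b with
          | false => rfl
          | true =>
            exfalso
            exact hb rfl (by rw [List.getElem?_eq_getElem h, ← hx, hsp])
        subst hbf
        simp only [fispAux, hsp, beq_self_eq_true, if_pos, Bool.false_eq_true, if_false,
          List.filterMap_cons, List.filterMap_nil]
        rw [show ((i : Int) + 1) = ((i + 1 : Nat) : Int) by push_cast; ring]
        rw [show fispAux (xs.drop (i+1)) ((i+1 : Nat) : Int) true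
              = fispAux (xs.drop j) (j : Int) (" " == " ") by simpa [hsp] using hrun]
        simp [List.append_assoc]
      · have hxb : (x == " ") = false := beq_eq_false_iff_ne.mpr hsp
        simp only [fispAux, hxb, Bool.false_eq_true, if_false, List.filterMap_cons,
          List.filterMap_nil]
        rw [show ((i : Int) + 1) = ((i + 1 : Nat) : Int) by push_cast; ring]
        rw [show fispAux (xs.drop (i+1)) ((i+1 : Nat) : Int) false
              = fispAux (xs.drop j) (j : Int) (x == " ") by simpa [hxb] using hrun]
        simp [hxb]
    · rw [buildRuns]
      simp [List.drop_eq_nil_of_le (by omega : xs.length ≤ i), fispAux, h]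

-- ===== VERDICT (by name: the statement is the Claim_ definition above) =====
theorem fisp_spec : Claim_equal_fisp := by
  intro lis _
  show fisp lis = fisp_alt lis
  have hA : (List.foldl fispStep ([], 0, 0) lis).1 = fispAux lis 0 false := by
    simpa using fispA_aux lis [] 0 false
  have hB := buildRuns_spec lis lis.length 0 [] false (by omega) (by simp)
  unfold fisp fisp_alt
  rw [hA, hB]
  simp
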